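-- pv_equiv track=rewrite | github.com/coffee4tw/advent-of-code | 2019/15/main.py | fully_explored
-- ===== SOURCE A (Python) =====
-- def fully_explored(area):
-- 	for p in area:
-- 		if area[p] == '#':
-- 			continue
-- 		if (p[0], p[1]+1) not in area:
-- 			return False
-- 		if (p[0], p[1]-1) not in area:
-- 			return False
-- 		if (p[0]+1, p[1]) not in area:
-- 			return False
-- 		if (p[0]-1, p[1]) not in area:
-- 			return False
-- 	return True
-- ===== SOURCE B (Python) =====
-- def fully_explored(area):
-- 	deg = {}
-- 	for x, y in area:
-- 		for n in ((x, y+1), (x, y-1), (x+1, y), (x-1, y)):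
-- 			deg[n] = deg.get(n, 0) + 1
-- 	return all(deg.get(p, 0) == 4 for p in area if area[p] != '#')
-- ===== Notes on version B (the rewrite author's own statement) =====
-- stated objective: alternative
-- what changed: Replaces A's per-cell neighbour membership checks with an incidence-counting algorithm: one pass builds a degree counter in which every key increments the count of each of its four neighbour coordinates, then every non-wall cell is checked to have degree exactly 4; no membership test against the map is performed.
import Mathlib
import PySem

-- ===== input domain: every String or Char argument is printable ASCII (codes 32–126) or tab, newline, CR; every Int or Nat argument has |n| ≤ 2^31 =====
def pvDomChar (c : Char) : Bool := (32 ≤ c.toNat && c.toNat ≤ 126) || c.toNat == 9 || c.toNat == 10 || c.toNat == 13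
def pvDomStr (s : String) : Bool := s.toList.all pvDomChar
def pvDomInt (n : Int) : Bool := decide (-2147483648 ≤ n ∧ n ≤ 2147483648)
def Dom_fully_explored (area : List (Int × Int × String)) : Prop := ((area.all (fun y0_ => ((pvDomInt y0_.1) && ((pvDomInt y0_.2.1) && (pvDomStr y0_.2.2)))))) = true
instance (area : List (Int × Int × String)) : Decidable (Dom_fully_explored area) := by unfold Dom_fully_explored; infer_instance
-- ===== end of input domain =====

-- B replaces A's per-cell neighbour membership checks by incidence counting: every key
-- increments a counter at each of its four neighbour coordinates, then each non-wall cell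
-- is checked to have count exactly 4 (alternative; no membership tests against the map).

-- The dict is flattened to (x, y, value) triples; lookup matches the first two components
-- (exact: dict keys are unique, so first match = dict lookup; see Pre_).
def areaGet? (area : List (Int × Int × String)) (k : Int × Int) : Option String :=
  match area.find? (fun q => decide (q.1 = k.1 ∧ q.2.1 = k.2)) with
  | some q => some q.2.2
  | none => none

def areaHas (area : List (Int × Int × String)) (k : Int × Int) : Bool :=
  area.any (fun q => decide (q.1 = k.1 ∧ q.2.1 = k.2))

-- ===== PORT A =====
-- the 'for p in area' loop with early returns, as structural recursion over the key list
def fe_go (area rest : List (Int × Int × String)) : Bool :=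
  match rest with
  | [] => true
  | q :: t =>
    if areaGet? area (q.1, q.2.1) == some "#" then fe_go area t
    else if !(areaHas area (q.1, q.2.1 + 1)) then false
    else if !(areaHas area (q.1, q.2.1 - 1)) then false
    else if !(areaHas area (q.1 + 1, q.2.1)) then false
    else if !(areaHas area (q.1 - 1, q.2.1)) then false
    else fe_go area t

def fully_explored (area : List (Int × Int × String)) : Bool := fe_go area area

-- ===== PORT B =====
def nbrs (p : Int × Int) : List (Int × Int) :=
  [(p.1, p.2 + 1), (p.1, p.2 - 1), (p.1 + 1, p.2), (p.1 - 1, p.2)]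

def fully_explored_alt (area : List (Int × Int × String)) : Bool :=
  let deg : PySem.Dict (Int × Int) Int :=
    area.foldl
      (fun d q =>
        (nbrs (q.1, q.2.1)).foldl (fun d n => d.insert n (d.getD n 0 + 1)) d)
      PySem.Dict.empty
  area.all (fun q =>
    (areaGet? area (q.1, q.2.1) == some "#") || (deg.getD (q.1, q.2.1) 0 == 4))

-- ===== PRECONDITION & SPEC =====
-- Pre_ requires the association list to have pairwise-distinct keys: the Python argument
-- is a dict, whose keys are always unique, so this excludes no actual input of A.
def Pre_fully_explored (area : List (Int × Int × String)) : Prop :=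
  (area.map (fun q => (q.1, q.2.1))).Nodup
instance (area : List (Int × Int × String)) : Decidable (Pre_fully_explored area) := by
  unfold Pre_fully_explored; infer_instance

def pvWitness_fully_explored : (List (Int × Int × String)) :=
  [((0 : Int), (0 : Int), "#"), ((1 : Int), (0 : Int), ".")]

def Spec_fully_explored (area : List (Int × Int × String)) (out : Bool) : Prop := out = fully_explored_alt area
instance (area : List (Int × Int × String)) (out : Bool) : Decidable (Spec_fully_explored area out) := by unfold Spec_fully_explored; infer_instance

-- ===== CLAIM (what is proved, stated in full; the proofs are below) =====
def Claim_equal_fully_explored : Prop := ∀ (area : List (Int × Int × String)), Dom_fully_explored area → Pre_fully_explored area → Spec_fully_explored area (fully_explored area)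

-- ===== LEMMAS AND PROOFS =====

theorem areaHas_iff (area : List (Int × Int × String)) (k : Int × Int) :
    areaHas area k = true ↔ k ∈ area.map (fun q => (q.1, q.2.1)) := by
  unfold areaHas
  rw [List.any_eq_true]
  simp [List.mem_map, Prod.ext_iff]

-- A's loop equals an `all` of the per-cell four-neighbour check
theorem fe_go_eq_all (area rest : List (Int × Int × String)) :
    fe_go area rest
      = rest.all (fun q =>
          (areaGet? area (q.1, q.2.1) == some "#")
          || (nbrs (q.1, q.2.1)).all (areaHas area)) := by
  induction rest with
  | nil => simp [fe_go]
  | cons q t ih =>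
    rw [fe_go, List.all_cons, ih]
    by_cases hw : (areaGet? area (q.1, q.2.1) == some "#") = true
    · simp [hw]
    · rw [if_neg hw]
      simp only [nbrs, List.all_cons, List.all_nil]
      cases h1 : areaHas area (q.1, q.2.1 + 1) <;>
      cases h2 : areaHas area (q.1, q.2.1 - 1) <;>
      cases h3 : areaHas area (q.1 + 1, q.2.1) <;>
      cases h4 : areaHas area (q.1 - 1, q.2.1) <;>
      simp_all

-- each key contributes to p's degree once for each neighbour of p it equals
theorem count_nbrs (k p : Int × Int) :
    ((nbrs k).count p : Int) =
      (if k = (p.1, p.2 + 1) then 1 else 0) + (if k = (p.1, p.2 - 1) then 1 else 0)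
      + (if k = (p.1 + 1, p.2) then 1 else 0) + (if k = (p.1 - 1, p.2) then 1 else 0) := by
  rcases k with ⟨kx, ky⟩; rcases p with ⟨px, py⟩
  simp only [nbrs, List.count_cons, List.count_nil, beq_iff_eq, Prod.mk.injEq]
  split_ifs <;> omega

theorem deg_getD (rest : List (Int × Int × String)) (d : PySem.Dict (Int × Int) Int)
    (p : Int × Int) :
    (rest.foldl
      (fun d q =>
        (nbrs (q.1, q.2.1)).foldl (fun d n => d.insert n (d.getD n 0 + 1)) d) d).getD p 0
    = d.getD p 0
      + ((rest.map (fun q => (q.1, q.2.1))).count (p.1, p.2 + 1) : Int)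
      + ((rest.map (fun q => (q.1, q.2.1))).count (p.1, p.2 - 1) : Int)
      + ((rest.map (fun q => (q.1, q.2.1))).count (p.1 + 1, p.2) : Int)
      + ((rest.map (fun q => (q.1, q.2.1))).count (p.1 - 1, p.2) : Int) := by
  induction rest generalizing d with
  | nil => simp
  | cons q t ih =>
    rw [List.foldl_cons, ih, PySem.Dict.getD_foldl_insert_add_one]
    simp only [List.map_cons, List.count_cons, beq_iff_eq]
    rw [count_nbrs]
    push_cast
    split_ifs <;> ring

-- degree 4 ↔ all four neighbours are keys (keys Nodup: each count is 0 or 1)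
theorem deg_four_iff (area : List (Int × Int × String))
    (hnd : (area.map (fun q => (q.1, q.2.1))).Nodup) (p : Int × Int) :
    (((area.map (fun q => (q.1, q.2.1))).count (p.1, p.2 + 1) : Int)
      + ((area.map (fun q => (q.1, q.2.1))).count (p.1, p.2 - 1) : Int)
      + ((area.map (fun q => (q.1, q.2.1))).count (p.1 + 1, p.2) : Int)
      + ((area.map (fun q => (q.1, q.2.1))).count (p.1 - 1, p.2) : Int) = 4)
    ↔ ((nbrs p).all (areaHas area) = true) := by
  have hle := List.nodup_iff_count_le_one.mp hnd
  have hpos : ∀ k : Int × Int,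
      k ∈ area.map (fun q => (q.1, q.2.1)) ↔ 0 < (area.map (fun q => (q.1, q.2.1))).count k :=
    fun k => List.count_pos_iff.symm
  simp only [nbrs, List.all_cons, List.all_nil, Bool.and_true, Bool.and_eq_true,
    areaHas_iff, hpos]
  have h1 := hle (p.1, p.2 + 1)
  have h2 := hle (p.1, p.2 - 1)
  have h3 := hle (p.1 + 1, p.2)
  have h4 := hle (p.1 - 1, p.2)
  omega

-- ===== VERDICT (by name: the statement is the Claim_ definition above) =====
theorem fully_explored_spec : Claim_equal_fully_explored := by
  intro area _ hpre
  unfold Spec_fully_explored fully_explored fully_explored_alt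
  rw [fe_go_eq_all]
  refine congrArg (List.all area) (funext (fun q => ?_))
  by_cases hw : (areaGet? area (q.1, q.2.1) == some "#") = true
  ·  simp [hw]
  ·  simp only [hw, Bool.false_or]
     rw [Bool.eq_iff_iff, List.all_eq_true, beq_iff_eq, deg_getD]
     rw [PySem.Dict.getD_empty]
     rw [← List.all_eq_true, ← deg_four_iff area hpre (q.1, q.2.1)]
     constructor <;> intro h <;> omega
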